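-- pv_equiv track=rewrite | github.com/Kuhron/programming | Emergence/EcosystemJumpingCreatures.py | get_points_at_distance
-- ===== SOURCE A (Python) =====
-- def get_points_at_distance(p, d):
--     assert type(p) is tuple
--     assert len(p) > 0, "empty tuple"
--     assert all(type(x) is int for x in p), set(type(x) for x in p)
--     assert type(d) is int, type(d)
--     assert d >= 0, d
--
--     if d == 0:
--         return [p]
--     a, *ps = p
--     if len(p) == 1:
--         return [(a-d,), (a+d,)]
--     l = []
--     for x in range(-d, d+1):
--         l += [(a+x,) + p2 for p2 in get_points_at_distance(p[1:], d - abs(x))]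
--
--     # debug
--     # for p2 in l:
--     #     s = 0
--     #     for i in range(len(p)):
--     #         s += abs(p[i] - p2[i])
--     #     assert s == d, f"point with wrong distance: {p} to {p2} is {s} but should be {d}"
--
--     return l
-- ===== SOURCE B (Python) =====
-- def get_points_at_distance(p, d):
--     assert type(p) is tuple
--     assert len(p) > 0, "empty tuple"
--     assert all(type(x) is int for x in p), set(type(x) for x in p)
--     assert type(d) is int, type(d)
--     assert d >= 0, d
--
--     # Breadth-first, layer by layer: expand one coordinate at a time,
--     # keeping (partial_point, remaining_budget) states in output order.
--     states = [((), d)]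
--     for a in p[:-1]:
--         states = [(partial + (a + x,), b - abs(x))
--                   for (partial, b) in states
--                   for x in range(-b, b + 1)]
--     a = p[-1]
--     out = []
--     for partial, b in states:
--         if b == 0:
--             out.append(partial + (a,))
--         else:
--             out.append(partial + (a - b,))
--             out.append(partial + (a + b,))
--     return out
-- ===== Notes on version B (the rewrite author's own statement) =====
-- stated objective: alternative
-- what changed: Replaced A's depth-first recursion over the tail of the tuple by an iterative breadth-first pass that expands one coordinate per layer, carrying (partial_point, remaining_budget) states in output order and emitting the last coordinate's one or two endpoints at the end.
import Mathlib
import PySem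

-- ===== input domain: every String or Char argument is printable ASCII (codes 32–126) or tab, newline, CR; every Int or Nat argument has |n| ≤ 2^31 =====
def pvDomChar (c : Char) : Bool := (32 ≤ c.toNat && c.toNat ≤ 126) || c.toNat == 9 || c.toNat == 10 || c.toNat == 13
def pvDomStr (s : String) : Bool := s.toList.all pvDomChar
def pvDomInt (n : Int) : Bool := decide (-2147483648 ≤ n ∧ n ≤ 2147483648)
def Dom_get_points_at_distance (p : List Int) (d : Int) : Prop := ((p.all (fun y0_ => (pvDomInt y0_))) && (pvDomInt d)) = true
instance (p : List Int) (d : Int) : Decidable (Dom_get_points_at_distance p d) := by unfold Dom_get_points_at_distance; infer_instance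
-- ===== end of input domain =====

-- B replaces A's depth-first recursion by an iterative breadth-first layer expansion
-- over the coordinates (objective: alternative decomposition, same output order and cost).

-- ===== PORT A =====
-- literal port of A's recursion (the 'a, *ps = p' unpack raises on an empty tuple: outside Pre_)
def get_points_at_distance (p : List Int) (d : Int) : List (List Int) :=
  if d = 0 then [p]
  else
    match p with
    | [] => []
    | a :: ps =>
      if ps = [] then [[a - d], [a + d]]
      else (PySem.List.pyRange (-d) (d + 1) 1).foldl
        (fun l x => l ++ (get_points_at_distance ps (d - |x|)).map (fun p2 => (a + x) :: p2)) []

-- ===== PORT B =====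
-- one layer of Source B's comprehension: expand coordinate c in every pending state
def gpadExpand (sts : List (List Int × Int)) (c : Int) : List (List Int × Int) :=
  sts.flatMap (fun s =>
    (PySem.List.pyRange (-s.2) (s.2 + 1) 1).map (fun x => (s.1 ++ [c + x], s.2 - |x|)))

-- Source B's final emission loop over the last coordinate
def gpadEmit (a : Int) (sts : List (List Int × Int)) : List (List Int) :=
  sts.foldl (fun out s =>
    if s.2 = 0 then out ++ [s.1 ++ [a]]
    else out ++ [s.1 ++ [a - s.2], s.1 ++ [a + s.2]]) []

-- Source B: asserts fail on the empty tuple (outside Pre_); p[:-1] = dropLast, p[-1] = getLast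
def get_points_at_distance_alt (p : List Int) (d : Int) : List (List Int) :=
  match p.getLast? with
  | none => []
  | some a => gpadEmit a (p.dropLast.foldl gpadExpand [(([] : List Int), d)])

-- ===== PRECONDITION & SPEC =====
-- Pre_: exactly where the Python A returns (its asserts raise on p = () and d < 0)
def Pre_get_points_at_distance (p : List Int) (d : Int) : Prop := p ≠ [] ∧ 0 ≤ d
instance (p : List Int) (d : Int) : Decidable (Pre_get_points_at_distance p d) := by
  unfold Pre_get_points_at_distance; infer_instance
def pvWitness_get_points_at_distance : List Int × Int := ([1, -2], 2)

def Spec_get_points_at_distance (p : List Int) (d : Int) (out : List (List Int)) : Prop := out = get_points_at_distance_alt p d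
instance (p : List Int) (d : Int) (out : List (List Int)) : Decidable (Spec_get_points_at_distance p d out) := by unfold Spec_get_points_at_distance; infer_instance

-- ===== CLAIM (what is proved, stated in full; the proofs are below) =====
def Claim_equal_get_points_at_distance : Prop := ∀ (p : List Int) (d : Int), Dom_get_points_at_distance p d → Pre_get_points_at_distance p d → Spec_get_points_at_distance p d (get_points_at_distance p d)

-- ===== LEMMAS AND PROOFS =====

theorem gpadEmit_eq_flatMap (a : Int) (sts : List (List Int × Int)) :
    gpadEmit a sts = sts.flatMap (fun s =>
      if s.2 = 0 then [s.1 ++ [a]] else [s.1 ++ [a - s.2], s.1 ++ [a + s.2]]) := by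
  unfold gpadEmit
  have h : (fun (out : List (List Int)) (s : List Int × Int) =>
      if s.2 = 0 then out ++ [s.1 ++ [a]]
      else out ++ [s.1 ++ [a - s.2], s.1 ++ [a + s.2]])
      = (fun out s => out ++
          (if s.2 = 0 then [s.1 ++ [a]] else [s.1 ++ [a - s.2], s.1 ++ [a + s.2]])) := by
    funext out s; split <;> rfl
  rw [h, PySem.List.foldl_append_eq_flatMap]
  simp

theorem flatMap_congr' {α β : Type} (l : List α) (f g : α → List β)
    (h : ∀ x ∈ l, f x = g x) : l.flatMap f = l.flatMap g := by
  induction l with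
  | nil => rfl
  | cons x xs ih =>
    simp only [List.flatMap_cons]
    rw [h x (by simp), ih (fun y hy => h y (by simp [hy]))]

theorem gpadExpand_nonneg (sts : List (List Int × Int)) (c : Int)
    (h : ∀ s ∈ sts, 0 ≤ s.2) : ∀ s ∈ gpadExpand sts c, 0 ≤ s.2 := by
  intro s hs
  simp only [gpadExpand, List.mem_flatMap, List.mem_map] at hs
  obtain ⟨t, ht, x, hx, rfl⟩ := hs
  rw [PySem.List.mem_pyRange_one] at hx
  have h0 := h t ht
  simp only
  rcases abs_cases x with ⟨he, _⟩ | ⟨he, _⟩ <;> omega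

-- A at budget 0 returns the point itself
theorem gpad_zero (p : List Int) : get_points_at_distance p 0 = [p] := by
  cases p <;> simp [get_points_at_distance]

-- A on a single coordinate
theorem gpad_single (a b : Int) (_hb : 0 ≤ b) :
    get_points_at_distance [a] b = if b = 0 then [[a]] else [[a - b], [a + b]] := by
  by_cases h : b = 0 <;> simp [get_points_at_distance, h]

-- the main invariant: emitting after folding layers = A's recursion mapped over the states
theorem gpad_main (i : List Int) (a : Int) :
    ∀ (sts : List (List Int × Int)), (∀ s ∈ sts, 0 ≤ s.2) →
    gpadEmit a (i.foldl gpadExpand sts)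
      = sts.flatMap (fun s => (get_points_at_distance (i ++ [a]) s.2).map (fun t => s.1 ++ t)) := by
  induction i with
  | nil =>
    intro sts h
    rw [List.foldl_nil, gpadEmit_eq_flatMap]
    apply flatMap_congr'
    intro s hs
    rw [List.nil_append, gpad_single a s.2 (h s hs)]
    by_cases h0 : s.2 = 0 <;> simp [h0]
  | cons c i' ih =>
    intro sts h
    rw [List.foldl_cons, ih (gpadExpand sts c) (gpadExpand_nonneg sts c h)]
    unfold gpadExpand
    rw [List.flatMap_assoc]
    apply flatMap_congr'
    intro s hs
    rw [List.flatMap_map]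
    by_cases h0 : s.2 = 0
    · rw [h0]
      have : PySem.List.pyRange (-(0:Int)) (0 + 1) 1 = [0] := by decide
      rw [this]
      simp [gpad_zero, List.append_assoc]
    · have htail : i' ++ [a] ≠ [] := by simp
      conv_rhs => rw [List.cons_append, get_points_at_distance]
      rw [if_neg h0, if_neg htail]
      rw [PySem.List.foldl_append_eq_flatMap, List.nil_append, List.map_flatMap]
      apply flatMap_congr'
      intro x hx
      simp [Function.comp_def, List.append_assoc]

-- ===== VERDICT (by name: the statement is the Claim_ definition above) =====
theorem get_points_at_distance_spec : Claim_equal_get_points_at_distance := by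
  intro p d _ hpre
  obtain ⟨hp, hd⟩ := hpre
  unfold Spec_get_points_at_distance get_points_at_distance_alt
  have hlast : p.getLast? = some (p.getLast hp) := List.getLast?_eq_some_getLast hp
  rw [hlast]; dsimp only
  rw [gpad_main p.dropLast (p.getLast hp) [(([] : List Int), d)]
    (by intro s hs; simp at hs; simp [hs, hd])]
  rw [List.dropLast_append_getLast hp]
  simp
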